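-- pv_equiv track=rewrite | github.com/sinaziaee/tenat_back | scripts/tf_idf/basic_tf_idf.py | words_docs_frequency
-- ===== SOURCE A (Python) =====
-- def words_docs_frequency(document_word):
--     words_in_docs = {}
--     for doc, words in document_word.items():
--         for word in words:
--             if word not in words_in_docs:
--                 words_in_docs[word] = [doc]
--             elif doc not in words_in_docs[word]:
--                 words_in_docs[word].append(doc)
--     return words_in_docs
-- ===== SOURCE B (Python) =====
-- def words_docs_frequency(document_word):
--     order = dict.fromkeys(w for ws in document_word.values() for w in ws)
--     return {w: [d for d, ws in document_word.items() if w in ws] for w in order}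
-- ===== Notes on version B (the rewrite author's own statement) =====
-- stated objective: alternative
-- what changed: B is word-major instead of doc-major: it first computes the distinct words in first-occurrence order, then builds each word's list by filtering the documents that contain it, with no incremental dict mutation or membership checks on the growing output.
import Mathlib
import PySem

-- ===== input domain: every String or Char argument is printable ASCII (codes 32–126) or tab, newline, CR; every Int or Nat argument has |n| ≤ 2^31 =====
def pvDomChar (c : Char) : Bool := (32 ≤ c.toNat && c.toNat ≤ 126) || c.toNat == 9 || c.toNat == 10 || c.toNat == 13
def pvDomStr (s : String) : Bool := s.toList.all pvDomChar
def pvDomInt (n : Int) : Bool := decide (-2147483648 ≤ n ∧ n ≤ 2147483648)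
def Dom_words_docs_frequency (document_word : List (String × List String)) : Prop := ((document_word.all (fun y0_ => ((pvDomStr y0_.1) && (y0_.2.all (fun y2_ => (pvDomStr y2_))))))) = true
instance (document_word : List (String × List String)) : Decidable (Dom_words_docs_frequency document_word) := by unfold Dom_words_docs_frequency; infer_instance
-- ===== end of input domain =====

-- B builds the map word-major (distinct words in first-occurrence order, then filter the docs containing each word) instead of A's doc-major incremental dict; return value proved identical.

-- ===== PORT A =====
def wdfStepA (doc : String) (wd : PySem.Dict String (List String)) (word : String) : PySem.Dict String (List String) :=
  match wd.get? word with
  | none => wd.insert word [doc]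
  | some ds => if doc ∈ ds then wd else wd.insert word (ds ++ [doc])

def words_docs_frequency (document_word : List (String × List String)) : List (String × List String) :=
  (document_word.foldl (fun wd p => p.2.foldl (wdfStepA p.1) wd) PySem.Dict.empty).items

-- ===== PORT B =====
def words_docs_frequency_alt (document_word : List (String × List String)) : List (String × List String) :=
  let order : List String := PySem.List.dedup (document_word.flatMap (fun p => p.2))
  order.map (fun w => (w, (document_word.filter (fun p => p.2.contains w)).map Prod.fst))

-- ===== PRECONDITION & SPEC =====
-- Pre_ excludes association lists with duplicate document keys: A's parameter is a Python dict,
-- whose keys are necessarily distinct, so such lists represent no Python input.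
def Pre_words_docs_frequency (document_word : List (String × List String)) : Prop :=
  (document_word.map Prod.fst).Nodup
instance (document_word : List (String × List String)) : Decidable (Pre_words_docs_frequency document_word) := by unfold Pre_words_docs_frequency; infer_instance

def pvWitness_words_docs_frequency : (List (String × List String)) :=
  [("d1", ["a", "b", "a"]), ("d2", ["b", "c"])]

def Spec_words_docs_frequency (document_word : List (String × List String)) (out : List (String × List String)) : Prop := out = words_docs_frequency_alt document_word
instance (document_word : List (String × List String)) (out : List (String × List String)) : Decidable (Spec_words_docs_frequency document_word out) := by unfold Spec_words_docs_frequency; infer_instance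

-- ===== CLAIM (what is proved, stated in full; the proofs are below) =====
def Claim_equal_words_docs_frequency : Prop := ∀ (document_word : List (String × List String)), Dom_words_docs_frequency document_word → Pre_words_docs_frequency document_word → Spec_words_docs_frequency document_word (words_docs_frequency document_word)

-- ===== LEMMAS AND PROOFS =====

-- A's step on a word whose entry already holds doc is a no-op.
lemma stepA_of_mem (doc : String) (wd : PySem.Dict String (List String)) (w : String)
    (h : doc ∈ wd.getD w []) : wdfStepA doc wd w = wd := by
  unfold wdfStepA
  cases hg : wd.get? w with
  | none => rw [PySem.Dict.getD_eq_get?_getD, hg] at h; simp at h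
  | some ds =>
    rw [PySem.Dict.getD_eq_get?_getD, hg] at h
    simp only [Option.getD_some] at h
    simp [h]

-- A's step touches only the entry of its own word.
lemma stepA_getD_of_ne (doc : String) (wd : PySem.Dict String (List String)) (w0 w : String)
    (h : w ≠ w0) : (wdfStepA doc wd w0).getD w [] = wd.getD w [] := by
  cases hg : wd.get? w0 with
  | none => simp only [wdfStepA, hg]; rw [PySem.Dict.getD_insert, if_neg h]
  | some ds =>
    simp only [wdfStepA, hg]
    split
    · rfl
    · rw [PySem.Dict.getD_insert, if_neg h]

-- On a fresh (doc ∉ entry) word A's step appends doc to that word's entry.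
lemma stepA_getD_self (doc : String) (wd : PySem.Dict String (List String)) (w : String)
    (h : doc ∉ wd.getD w []) : (wdfStepA doc wd w).getD w [] = wd.getD w [] ++ [doc] := by
  cases hg : wd.get? w with
  | none =>
    have hD : wd.getD w [] = [] := by rw [PySem.Dict.getD_eq_get?_getD, hg]; rfl
    simp only [wdfStepA, hg]
    rw [PySem.Dict.getD_insert_self, hD]; rfl
  | some ds =>
    have hD : wd.getD w [] = ds := by rw [PySem.Dict.getD_eq_get?_getD, hg]; rfl
    rw [hD] at h
    simp only [wdfStepA, hg]
    rw [if_neg h, PySem.Dict.getD_insert_self, hD]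

-- A's step can only add doc itself to an entry.
lemma stepA_mem (doc : String) (wd : PySem.Dict String (List String)) (w0 w x : String)
    (h : x ∈ (wdfStepA doc wd w0).getD w []) : x ∈ wd.getD w [] ∨ x = doc := by
  by_cases he : w = w0
  · subst he
    by_cases hm : doc ∈ wd.getD w []
    · rw [stepA_of_mem doc wd w hm] at h; exact Or.inl h
    · rw [stepA_getD_self doc wd w hm] at h
      rcases List.mem_append.mp h with h' | h'
      · exact Or.inl h'
      · exact Or.inr (List.mem_singleton.mp h')
  · rw [stepA_getD_of_ne doc wd w0 w he] at h; exact Or.inl h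

-- A's step extends the key list exactly like Set.add.
lemma stepA_keys (doc : String) (wd : PySem.Dict String (List String)) (w : String) :
    (wdfStepA doc wd w).keys = PySem.Set.add wd.keys w := by
  cases hg : wd.get? w with
  | none =>
    have hc : wd.contains w = false := by
      rw [PySem.Dict.contains_eq_isSome_get?, hg]; rfl
    have hk : w ∉ wd.keys := fun hq =>
      absurd ((PySem.Dict.contains_iff_mem_keys wd w).mpr hq) (by simp [hc])
    simp only [wdfStepA, hg]
    rw [PySem.Dict.keys_insert_of_not_contains _ _ hc]
    simp [PySem.Set.add, hk]
  | some ds =>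
    have hc : wd.contains w = true := by
      rw [PySem.Dict.contains_eq_isSome_get?, hg]; rfl
    have hk : w ∈ wd.keys := (PySem.Dict.contains_iff_mem_keys wd w).mp hc
    simp only [wdfStepA, hg]
    split
    · simp [PySem.Set.add, hk]
    · rw [PySem.Dict.keys_insert_of_contains _ _ hc]; simp [PySem.Set.add, hk]

-- Inner loop: keys grow like Set.update with the document's words.
lemma inner_keys (doc : String) : ∀ (ws : List String) (wd : PySem.Dict String (List String)),
    (ws.foldl (wdfStepA doc) wd).keys = PySem.Set.update wd.keys ws := by
  intro ws
  induction ws with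
  | nil => intro wd; rfl
  | cons w rest ih =>
    intro wd
    simp only [List.foldl_cons, PySem.Set.update, ih, stepA_keys]

-- Once doc is in w's entry, the rest of the inner loop leaves that entry unchanged.
lemma inner_getD_of_mem (doc w : String) : ∀ (ws : List String) (wd : PySem.Dict String (List String)),
    doc ∈ wd.getD w [] → (ws.foldl (wdfStepA doc) wd).getD w [] = wd.getD w [] := by
  intro ws
  induction ws with
  | nil => intro wd _; rfl
  | cons w0 rest ih =>
    intro wd hm
    by_cases he : w0 = w
    · subst he
      rw [List.foldl_cons, stepA_of_mem doc wd w0 hm, ih wd hm]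
    · have h1 : (wdfStepA doc wd w0).getD w [] = wd.getD w [] :=
        stepA_getD_of_ne doc wd w0 w (fun h => he h.symm)
      rw [List.foldl_cons, ih _ (h1 ▸ hm), h1]

-- Inner loop, fresh doc: w's entry gains doc exactly when w occurs among the document's words.
lemma inner_getD (doc w : String) : ∀ (ws : List String) (wd : PySem.Dict String (List String)),
    doc ∉ wd.getD w [] →
    (ws.foldl (wdfStepA doc) wd).getD w []
      = wd.getD w [] ++ (if w ∈ ws then [doc] else []) := by
  intro ws
  induction ws with
  | nil => intro wd _; simp
  | cons w0 rest ih =>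
    intro wd hnm
    by_cases he : w0 = w
    · subst he
      have h1 := stepA_getD_self doc wd w0 hnm
      have hm : doc ∈ (wdfStepA doc wd w0).getD w0 [] := by rw [h1]; simp
      rw [List.foldl_cons, inner_getD_of_mem doc w0 rest _ hm, h1]
      simp
    · have h1 : (wdfStepA doc wd w0).getD w [] = wd.getD w [] :=
        stepA_getD_of_ne doc wd w0 w (fun h => he h.symm)
      rw [List.foldl_cons, ih _ (h1 ▸ hnm), h1]
      have hne : ¬ w = w0 := fun h => he h.symm
      simp [List.mem_cons, hne]

-- Inner loop can only add doc itself to entries.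
lemma inner_mem (doc : String) : ∀ (ws : List String) (wd : PySem.Dict String (List String)) (w x : String),
    x ∈ (ws.foldl (wdfStepA doc) wd).getD w [] → x ∈ wd.getD w [] ∨ x = doc := by
  intro ws
  induction ws with
  | nil => intro wd w x h; exact Or.inl h
  | cons w0 rest ih =>
    intro wd w x h
    rw [List.foldl_cons] at h
    rcases ih _ w x h with h' | h'
    · exact stepA_mem doc wd w0 w x h'
    · exact Or.inr h'

-- Outer loop, keys: the keys are Set.update with all words of all documents in order.
lemma outer_keys : ∀ (l : List (String × List String)) (wd : PySem.Dict String (List String)),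
    (l.foldl (fun wd p => p.2.foldl (wdfStepA p.1) wd) wd).keys
      = PySem.Set.update wd.keys (l.flatMap (fun p => p.2)) := by
  intro l
  induction l with
  | nil => intro wd; rfl
  | cons p rest ih =>
    intro wd
    simp only [List.foldl_cons, List.flatMap_cons, ih, inner_keys, PySem.Set.update, List.foldl_append]

-- Outer loop, entries: with distinct fresh doc names, w's entry collects exactly the docs containing w.
lemma outer_getD (w : String) : ∀ (l : List (String × List String)) (wd : PySem.Dict String (List String)),
    (l.map Prod.fst).Nodup →
    (∀ p ∈ l, ∀ w', p.1 ∉ wd.getD w' []) →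
    (l.foldl (fun wd p => p.2.foldl (wdfStepA p.1) wd) wd).getD w []
      = wd.getD w [] ++ (l.filter (fun p => p.2.contains w)).map Prod.fst := by
  intro l
  induction l with
  | nil => intro wd _ _; simp
  | cons p rest ih =>
    intro wd hnd hfresh
    simp only [List.map_cons, List.nodup_cons] at hnd
    have hfr : p.1 ∉ wd.getD w [] := hfresh p (List.mem_cons_self) w
    have h1 := inner_getD p.1 w p.2 wd hfr
    have hfresh' : ∀ q ∈ rest, ∀ w', q.1 ∉ (p.2.foldl (wdfStepA p.1) wd).getD w' [] := by
      intro q hq w' hmem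
      rcases inner_mem p.1 p.2 wd w' q.1 hmem with h | h
      · exact hfresh q (List.mem_cons_of_mem _ hq) w' h
      · exact hnd.1 (h ▸ List.mem_map_of_mem (f := Prod.fst) hq)
    rw [List.foldl_cons, ih _ hnd.2 hfresh', h1]
    by_cases hc : w ∈ p.2
    · simp [hc]
    · simp [hc]

-- A dict with distinct keys is its key list paired with its lookups.
lemma items_eq_keys_map (d : PySem.Dict String (List String)) (h : d.keys.Nodup) :
    d.items = d.keys.map (fun k => (k, d.getD k [])) := by
  have : d.keys.map (fun k => (k, d.getD k [])) = d.items.map (fun p => (p.1, d.getD p.1 [])) := by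
    simp only [PySem.Dict.keys, List.map_map]; rfl
  rw [this, List.map_congr_left (fun p hp => ?_), List.map_id]
  have hpv : (p.1, p.2) ∈ d.items := by simpa using hp
  rw [PySem.Dict.getD_of_mem_items d hpv h]
  simp

-- ===== VERDICT (by name: the statement is the Claim_ definition above) =====
theorem words_docs_frequency_spec : Claim_equal_words_docs_frequency := by
  intro dw _ hpre
  unfold Spec_words_docs_frequency words_docs_frequency words_docs_frequency_alt
  have hkeys : (dw.foldl (fun wd p => p.2.foldl (wdfStepA p.1) wd) PySem.Dict.empty).keys
      = PySem.List.dedup (dw.flatMap (fun p => p.2)) := by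
    rw [outer_keys, PySem.Dict.keys_empty, PySem.List.dedup_eq_ofList, PySem.Set.ofList_eq_foldl]
    rfl
  have hnd : (dw.foldl (fun wd p => p.2.foldl (wdfStepA p.1) wd) PySem.Dict.empty).keys.Nodup := by
    rw [hkeys, PySem.List.dedup_eq_ofList]; exact PySem.Set.nodup_ofList _
  rw [items_eq_keys_map _ hnd, hkeys]
  apply List.map_congr_left
  intro w _
  rw [outer_getD w dw PySem.Dict.empty hpre (by intro p _ w'; simp [PySem.Dict.getD_empty])]
  simp [PySem.Dict.getD_empty]
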